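-- pv_equiv track=rewrite | github.com/paperwork-labs/paperwork | apis/axiomfolio/app/services/execution/risk_gate.py | _is_crypto_symbol
-- ===== SOURCE A (Python) =====
-- CRYPTO_SYMBOLS_CORE = frozenset({
--     "BTC", "ETH", "ADA", "SOL", "MATIC", "DOGE", "LTC", "XRP", "DOT", "AVAX",
--     "LINK", "UNI", "ATOM", "BCH",
-- })
--
-- def _is_crypto_symbol(symbol: str) -> bool:
--     """Return True if ``symbol`` should route through the crypto risk branch.
--
--     Recognizes:
--       * Bare crypto tickers in ``CRYPTO_SYMBOLS_CORE`` (e.g. ``"BTC"``)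
--       * Coinbase-style pair notation with USD/USDT quote (``"BTC-USD"``,
--         ``"ETH-USDT"``, ``"SOL/USD"``) where the base is in the core set.
--
--     Intentionally conservative: unknown aliases fall through to the equity
--     path, which fails closed for lack of MarketSnapshot data.
--     """
--     s = (symbol or "").upper().strip()
--     if not s:
--         return False
--     if s in CRYPTO_SYMBOLS_CORE:
--         return True
--     for sep in ("-", "/"):
--         if sep in s:
--             base, _, quote = s.partition(sep)
--             if quote in ("USD", "USDT", "USDC") and base in CRYPTO_SYMBOLS_CORE:
--                 return True
--     return False
-- ===== SOURCE B (Python) =====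
-- CRYPTO_SYMBOLS_CORE = frozenset({
--     "BTC", "ETH", "ADA", "SOL", "MATIC", "DOGE", "LTC", "XRP", "DOT", "AVAX",
--     "LINK", "UNI", "ATOM", "BCH",
-- })
--
-- # The recognized language is finite: expand it once into an exact-match set
-- # (14 bare tickers plus 14*2*3 = 84 pair spellings).
-- _CRYPTO_EXACT = frozenset(CRYPTO_SYMBOLS_CORE) | {
--     base + sep + quote
--     for base in CRYPTO_SYMBOLS_CORE
--     for sep in ("-", "/")
--     for quote in ("USD", "USDT", "USDC")
-- }
--
-- def _is_crypto_symbol(symbol: str) -> bool: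
--     s = (symbol or "").upper().strip()
--     return bool(s) and s in _CRYPTO_EXACT
-- ===== Notes on version B (the rewrite author's own statement) =====
-- stated objective: simpler
-- what changed: The finite recognized language (14 bare tickers plus 84 base+separator+quote pairs) is precomputed once into a frozenset, so the function body is a single exact-match membership test instead of a separator loop with partition and per-part checks.
import Mathlib
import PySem

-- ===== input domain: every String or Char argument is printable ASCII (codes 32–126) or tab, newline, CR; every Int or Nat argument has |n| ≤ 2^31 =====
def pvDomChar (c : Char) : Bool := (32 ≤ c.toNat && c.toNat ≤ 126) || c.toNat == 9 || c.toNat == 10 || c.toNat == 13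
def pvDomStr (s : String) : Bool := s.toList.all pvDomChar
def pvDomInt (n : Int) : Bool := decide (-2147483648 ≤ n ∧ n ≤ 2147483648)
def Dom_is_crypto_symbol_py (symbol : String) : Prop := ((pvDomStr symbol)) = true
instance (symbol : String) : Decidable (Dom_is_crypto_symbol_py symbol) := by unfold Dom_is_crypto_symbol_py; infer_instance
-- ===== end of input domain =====

-- B precomputes the finite recognized language into one exact-match set; A loops over separators. Simpler body, same values.

-- ===== PORT A =====
def cryptoCore : List String :=
  ["BTC", "ETH", "ADA", "SOL", "MATIC", "DOGE", "LTC", "XRP", "DOT", "AVAX",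
   "LINK", "UNI", "ATOM", "BCH"]

def cryptoQuotes : List String := ["USD", "USDT", "USDC"]

-- hand port of Python's `sep in s` + `s.partition(sep)` for a ONE-CHAR sep: returns
-- some (before, after) at the FIRST occurrence of sep, none exactly when sep not in s
-- (exact: Python's partition with a found single-char separator is (before, sep, after)).
def partChar (sep : Char) : List Char → Option (List Char × List Char)
  | [] => none
  | c :: rest =>
      if c = sep then some ([], rest)
      else (partChar sep rest).map (fun p => (c :: p.1, p.2))

-- one iteration of A's `for sep in ("-", "/")` loop body
def checkSepA (s : String) (sep : Char) : Bool :=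
  match partChar sep s.toList with
  | some (b, q) => cryptoQuotes.contains (String.ofList q) && cryptoCore.contains (String.ofList b)
  | none => false

def is_crypto_symbol_py (symbol : String) : Bool :=
  let s := PySem.Str.strip (PySem.Str.upper symbol)
  if s = "" then false
  else if cryptoCore.contains s then true
  else ['-', '/'].any (fun sep => checkSepA s sep)

-- ===== PORT B =====
def cryptoPairs : List String :=
  cryptoCore.flatMap (fun b =>
    ["-", "/"].flatMap (fun sep =>
      cryptoQuotes.map (fun q => b ++ sep ++ q)))

def cryptoExact : PySem.Set String :=
  PySem.Set.union (PySem.Set.ofList cryptoCore) (PySem.Set.ofList cryptoPairs)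

def is_crypto_symbol_py_alt (symbol : String) : Bool :=
  let s := PySem.Str.strip (PySem.Str.upper symbol)
  decide (s ≠ "") && PySem.Set.contains cryptoExact s

-- ===== PRECONDITION & SPEC =====
def Spec_is_crypto_symbol_py (symbol : String) (out : Bool) : Prop := out = is_crypto_symbol_py_alt symbol
instance (symbol : String) (out : Bool) : Decidable (Spec_is_crypto_symbol_py symbol out) := by unfold Spec_is_crypto_symbol_py; infer_instance

-- ===== CLAIM (what is proved, stated in full; the proofs are below) =====
def Claim_equal_is_crypto_symbol_py : Prop := ∀ (symbol : String), Dom_is_crypto_symbol_py symbol → Spec_is_crypto_symbol_py symbol (is_crypto_symbol_py symbol)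

-- ===== LEMMAS AND PROOFS =====

lemma partChar_some {sep : Char} :
    ∀ {l b q : List Char}, partChar sep l = some (b, q) → l = b ++ sep :: q := by
  intro l
  induction l with
  | nil => intro b q h; simp [partChar] at h
  | cons c rest ih =>
      intro b q h
      by_cases hc : c = sep
      · subst hc
        rw [partChar, if_pos rfl] at h
        injection h with h'
        injection h' with hb hq
        subst hb hq
        rfl
      · simp [partChar, hc] at h
        obtain ⟨p1, hp, hb⟩ := h
        subst hb
        simp [ih hp]

lemma checkSepA_mem_pairs {t : String} {sep : Char} (hsep : sep = '-' ∨ sep = '/')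
    (h : checkSepA t sep = true) : t ∈ cryptoPairs := by
  unfold checkSepA at h
  revert h
  cases hp : partChar sep t.toList with
  | none => intro h; simp at h
  | some bq =>
      intro h
      obtain ⟨b, q⟩ := bq
      simp only [Bool.and_eq_true, List.contains_eq_mem, decide_eq_true_eq] at h
      obtain ⟨hq, hb⟩ := h
      have ht : t.toList = b ++ sep :: q := partChar_some hp
      have hts : t = String.ofList b ++ String.ofList [sep] ++ String.ofList q := by
        have : t = String.ofList t.toList := by simp
        rw [this, ht]
        apply String.toList_injective
        simp [String.toList_ofList]
      rw [hts]
      unfold cryptoPairs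
      rw [List.mem_flatMap]
      refine ⟨String.ofList b, hb, ?_⟩
      rw [List.mem_flatMap]
      refine ⟨String.ofList [sep], ?_, ?_⟩
      · rcases hsep with h | h <;> subst h <;> decide
      · rw [List.mem_map]
        exact ⟨String.ofList q, hq, rfl⟩

set_option maxRecDepth 1000000 in
set_option maxHeartbeats 1000000 in
lemma pairs_checkSepA : ∀ t ∈ cryptoPairs, (checkSepA t '-' || checkSepA t '/') = true := by
  decide

lemma body_eq (t : String) :
    (if t = "" then false
     else if cryptoCore.contains t then true
     else ['-', '/'].any (fun sep => checkSepA t sep))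
    = (decide (t ≠ "") && PySem.Set.contains cryptoExact t) := by
  by_cases h0 : t = ""
  · simp [h0]
  · rw [if_neg h0]
    have hmem : PySem.Set.contains cryptoExact t = true ↔ (t ∈ cryptoCore ∨ t ∈ cryptoPairs) := by
      rw [PySem.Set.contains_iff]
      unfold cryptoExact
      rw [PySem.Set.mem_union]
      simp [PySem.Set.mem_ofList]
    by_cases hc : t ∈ cryptoCore
    · rw [if_pos (by simpa using hc)]
      simp only [ne_eq, h0, not_false_eq_true, decide_true, Bool.true_and]
      exact (hmem.mpr (Or.inl hc)).symm
    · rw [if_neg (by simpa using hc)]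
      simp only [ne_eq, h0, not_false_eq_true, decide_true, Bool.true_and]
      have hany : List.any ['-', '/'] (fun sep => checkSepA t sep)
          = (checkSepA t '-' || checkSepA t '/') := by simp
      rw [hany]
      by_cases hp : t ∈ cryptoPairs
      · rw [pairs_checkSepA t hp, (hmem.mpr (Or.inr hp))]
      · have : PySem.Set.contains cryptoExact t = false := by
          cases hcc : PySem.Set.contains cryptoExact t
          · rfl
          · exact absurd (hmem.mp hcc) (not_or.mpr ⟨hc, hp⟩)
        rw [this]
        cases hd : checkSepA t '-'
        · cases hs : checkSepA t '/'
          · rfl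
          · exact absurd (checkSepA_mem_pairs (Or.inr rfl) hs) hp
        · exact absurd (checkSepA_mem_pairs (Or.inl rfl) hd) hp

-- ===== VERDICT (by name: the statement is the Claim_ definition above) =====
theorem is_crypto_symbol_py_spec : Claim_equal_is_crypto_symbol_py := by
  intro symbol _
  unfold Spec_is_crypto_symbol_py is_crypto_symbol_py is_crypto_symbol_py_alt
  exact body_eq _
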